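-- pv_equiv track=rewrite | github.com/tekitounix/ai-ops | ai_ops/audit/nix.py | _stage_b
-- ===== SOURCE A (Python) =====
-- _STACK_RULES: tuple[tuple[str, tuple[str, ...], str, str], ...] = (
--     # (stack_hint, marker filenames, recommended_level, template_variant)
--     # Note: rust / go / cmake は専用 template が無いため `flake.nix.minimal` (= 最少 tool) に
--     # fallback する。AI agent が retrofit 時に project-specific tool (cargo / go / cmake) を
--     # tools 配列に追加するのが正解。`flake.nix.python` を rust/go に流用すると uv/ruff/pytest が
--     # 不要に混入するため誤り (self-review #1 finding)。
--     ("xmake", ("xmake.lua",), "devshell", "flake.nix.xmake"),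
--     ("cmake", ("CMakeLists.txt",), "devshell", "flake.nix.minimal"),  # tools = cmake/ninja/clang を AI が追加
--     ("node", ("package.json", "pnpm-lock.yaml", "bun.lockb"), "devshell", "flake.nix.node"),
--     ("python", ("pyproject.toml", "uv.lock", "requirements.txt", "Pipfile"), "devshell", "flake.nix.python"),
--     ("rust", ("Cargo.toml",), "devshell", "flake.nix.minimal"),  # tools = cargo/rustc を AI が追加
--     ("go", ("go.mod",), "devshell", "flake.nix.minimal"),  # tools = go を AI が追加
--     ("dsl", (".ato",), "devshell", "flake.nix.minimal"),  # extension match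
-- )
--
-- def _stage_b(top_names: list[str]) -> tuple[str, str, str]:
--     """Return (stack_hint, recommended_level, template_variant)."""
--     # Case-insensitive marker matching: top_names を lowercase 化、_STACK_RULES の marker
--     # も lowercase で比較する (CMakeLists.txt vs cmakelists.txt 等の差を吸収)。
--     lower = [n.lower() for n in top_names]
--     for hint, markers, level, template in _STACK_RULES:
--         for marker in markers:
--             marker_lower = marker.lower()
--             if marker_lower.startswith("."):
--                 if any(name.endswith(marker_lower) for name in lower):
--                     return hint, level, template
--             elif marker_lower in lower:
--                 return hint, level, template
--     return "unknown", "minimal", "flake.nix.minimal"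
-- ===== SOURCE B (Python) =====
-- _STACK_RULES: tuple[tuple[str, tuple[str, ...], str, str], ...] = (
--     ("xmake", ("xmake.lua",), "devshell", "flake.nix.xmake"),
--     ("cmake", ("CMakeLists.txt",), "devshell", "flake.nix.minimal"),
--     ("node", ("package.json", "pnpm-lock.yaml", "bun.lockb"), "devshell", "flake.nix.node"),
--     ("python", ("pyproject.toml", "uv.lock", "requirements.txt", "Pipfile"), "devshell", "flake.nix.python"),
--     ("rust", ("Cargo.toml",), "devshell", "flake.nix.minimal"),
--     ("go", ("go.mod",), "devshell", "flake.nix.minimal"),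
--     ("dsl", (".ato",), "devshell", "flake.nix.minimal"),
-- )
--
-- # Name-major single pass: a precomputed dict maps each lowercased exact marker to
-- # its rule index; the suffix rule keeps its own index. We keep the minimum rule
-- # index seen, which equals A's first-matching-rule precedence.
-- _MARKER_INDEX: dict[str, int] = {}
-- _ATO_INDEX: int | None = None
-- for _i, (_h, _markers, _l, _t) in enumerate(_STACK_RULES):
--     for _m in _markers:
--         _ml = _m.lower()
--         if _ml.startswith("."):
--             _ATO_INDEX = _i
--         else:
--             _MARKER_INDEX[_ml] = _i
--
--
-- def _stage_b(top_names: list[str]) -> tuple[str, str, str]: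
--     """Return (stack_hint, recommended_level, template_variant)."""
--     best: int | None = None
--     for name in top_names:
--         nl = name.lower()
--         idx = _MARKER_INDEX.get(nl)
--         if idx is None and nl.endswith(".ato"):
--             idx = _ATO_INDEX
--         if idx is not None and (best is None or idx < best):
--             best = idx
--     if best is None:
--         return "unknown", "minimal", "flake.nix.minimal"
--     hint, _markers, level, template = _STACK_RULES[best]
--     return hint, level, template
-- ===== Notes on version B (the rewrite author's own statement) =====
-- stated objective: alternative
-- what changed: Replaces A's rule-major scan (each rule's markers re-scanning the whole name list, with an early return) by a precomputed lowercased-marker-to-rule-index dict plus one name-major pass that keeps the minimum matching rule index, indexing _STACK_RULES once at the end.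
import Mathlib
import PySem

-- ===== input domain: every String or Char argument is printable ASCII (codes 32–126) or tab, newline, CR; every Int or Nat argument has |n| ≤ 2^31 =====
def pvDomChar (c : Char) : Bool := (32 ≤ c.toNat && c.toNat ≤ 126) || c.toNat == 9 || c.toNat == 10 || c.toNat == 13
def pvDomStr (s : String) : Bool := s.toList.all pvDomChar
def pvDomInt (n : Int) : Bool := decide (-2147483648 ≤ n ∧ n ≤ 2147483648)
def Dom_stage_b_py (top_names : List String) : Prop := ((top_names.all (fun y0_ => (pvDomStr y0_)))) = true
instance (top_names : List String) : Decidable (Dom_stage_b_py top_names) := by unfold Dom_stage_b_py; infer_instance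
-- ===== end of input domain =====

-- B replaces A's rule-major repeated list scans by a precomputed marker→rule-index dict and
-- one name-major pass keeping the minimum matching rule index (alternative decomposition).

-- ===== PORT A =====
-- the module constant _STACK_RULES (shared data, used by both ports like the Python module constant)
def pvRules : List (String × List String × String × String) :=
  [("xmake", ["xmake.lua"], "devshell", "flake.nix.xmake"),
   ("cmake", ["CMakeLists.txt"], "devshell", "flake.nix.minimal"),
   ("node", ["package.json", "pnpm-lock.yaml", "bun.lockb"], "devshell", "flake.nix.node"),
   ("python", ["pyproject.toml", "uv.lock", "requirements.txt", "Pipfile"], "devshell", "flake.nix.python"),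
   ("rust", ["Cargo.toml"], "devshell", "flake.nix.minimal"),
   ("go", ["go.mod"], "devshell", "flake.nix.minimal"),
   ("dsl", [".ato"], "devshell", "flake.nix.minimal")]

-- inner `for marker in markers: if …: return` of A, as the matching test of one rule
def stageAmarker (lower : List String) (ml : String) : Bool :=
  if PySem.Str.startswith ml "." then lower.any (fun name => PySem.Str.endswith name ml)
  else lower.contains ml

-- outer `for … in _STACK_RULES` with early return
def stageAscan (lower : List String) : List (String × List String × String × String) → String × String × String
  | [] => ("unknown", "minimal", "flake.nix.minimal")
  | (hint, markers, level, template) :: rest =>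
    if markers.any (fun m => stageAmarker lower (PySem.Str.lower m)) then (hint, level, template)
    else stageAscan lower rest

def stage_b_py (top_names : List String) : String × String × String :=
  stageAscan (top_names.map PySem.Str.lower) pvRules

-- ===== PORT B =====
-- module-level init loop of Source B: (_MARKER_INDEX, _ATO_INDEX)
def pvIndexInit : PySem.Dict String Int × Option Int :=
  (PySem.List.enumerate pvRules).foldl
    (fun acc p =>
      p.2.2.1.foldl
        (fun acc2 m =>
          let ml := PySem.Str.lower m
          if PySem.Str.startswith ml "." then (acc2.1, some p.1)
          else (PySem.Dict.insert acc2.1 ml p.1, acc2.2))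
        acc)
    (PySem.Dict.empty, none)

-- idx computed for one name inside B's loop
def stageBidx (nl : String) : Option Int :=
  match PySem.Dict.get? pvIndexInit.1 nl with
  | some i => some i
  | none => if PySem.Str.endswith nl ".ato" then pvIndexInit.2 else none

-- one iteration of B's loop over top_names
def stageBstep (best : Option Int) (name : String) : Option Int :=
  match stageBidx (PySem.Str.lower name) with
  | none => best
  | some i =>
    match best with
    | none => some i
    | some b => if i < b then some i else some b

def stage_b_py_alt (top_names : List String) : String × String × String :=
  match top_names.foldl stageBstep none with
  | none => ("unknown", "minimal", "flake.nix.minimal")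
  | some b =>
    -- _STACK_RULES[best]; pyGet? is total via Option, the none branch is unreachable
    match PySem.List.pyGet? pvRules b with
    | some (hint, _, level, template) => (hint, level, template)
    | none => ("unknown", "minimal", "flake.nix.minimal")

-- ===== PRECONDITION & SPEC =====
def Spec_stage_b_py (top_names : List String) (out : String × String × String) : Prop := out = stage_b_py_alt top_names
instance (top_names : List String) (out : String × String × String) : Decidable (Spec_stage_b_py top_names out) := by unfold Spec_stage_b_py; infer_instance

-- ===== CLAIM (what is proved, stated in full; the proofs are below) =====
def Claim_equal_stage_b_py : Prop := ∀ (top_names : List String), Dom_stage_b_py top_names → Spec_stage_b_py top_names (stage_b_py top_names)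

-- ===== LEMMAS AND PROOFS =====

-- lowered marker table in pvIndexInit's insertion order (proof-side mirror of _MARKER_INDEX)
def pvTbl : List (String × Nat) :=
  [("xmake.lua", 0), ("cmakelists.txt", 1), ("package.json", 2), ("pnpm-lock.yaml", 2),
   ("bun.lockb", 2), ("pyproject.toml", 3), ("uv.lock", 3), ("requirements.txt", 3),
   ("pipfile", 3), ("cargo.toml", 4), ("go.mod", 5)]

-- the rule index one lowered name matches, if any
def pvCls (n : String) : Option Nat :=
  match pvTbl.lookup n with
  | some i => some i
  | none => if PySem.Str.endswith n ".ato" then some 6 else none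

def pvMin : Option Nat → Option Nat → Option Nat
  | acc, none => acc
  | none, some i => some i
  | some b, some i => some (min b i)

def pvOut : Option Nat → String × String × String
  | some 0 => ("xmake", "devshell", "flake.nix.xmake")
  | some 1 => ("cmake", "devshell", "flake.nix.minimal")
  | some 2 => ("node", "devshell", "flake.nix.node")
  | some 3 => ("python", "devshell", "flake.nix.python")
  | some 4 => ("rust", "devshell", "flake.nix.minimal")
  | some 5 => ("go", "devshell", "flake.nix.minimal")
  | some 6 => ("dsl", "devshell", "flake.nix.minimal")
  | _ => ("unknown", "minimal", "flake.nix.minimal")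

lemma lookup_le (n : String) (k : Nat) (h : pvTbl.lookup n = some k) : k ≤ 5 := by
  have aux : ∀ (l : List (String × Nat)), (∀ p ∈ l, p.2 ≤ 5) → l.lookup n = some k → k ≤ 5 := by
    intro l hl h
    induction l with
    | nil => simp [List.lookup] at h
    | cons p t ih =>
      rw [List.lookup_cons] at h
      split at h
      · injection h with h; subst h; exact hl p (by simp)
      · exact ih (fun q hq => hl q (by simp [hq])) h
  exact aux pvTbl (by decide) h

lemma pvCls_le (n : String) (k : Nat) (h : pvCls n = some k) : k ≤ 6 := by
  unfold pvCls at h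
  split at h
  · next i hi => injection h with h; subst h; exact le_trans (lookup_le _ _ hi) (by omega)
  · split at h
    · injection h with h; omega
    · exact absurd h (by simp)

-- generic: get? of a dict literally built from an index table is lookup in the table
lemma dict_get?_mk_map (l : List (String × Nat)) (n : String) :
    (PySem.Dict.mk (l.map (fun p => (p.1, Int.ofNat p.2)))).get? n
      = (l.lookup n).map Int.ofNat := by
  induction l with
  | nil => simp [List.lookup, PySem.Dict.get?]
  | cons p t ih =>
    rw [List.map_cons, PySem.Dict.get?_mk_cons, List.lookup_cons]
    by_cases hk : p.1 = n
    · simp [hk]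
    · have h1 : (p.1 == n) = false := beq_eq_false_iff_ne.2 hk
      have h2 : (n == p.1) = false := beq_eq_false_iff_ne.2 (Ne.symm hk)
      simp only [h1, h2, Bool.false_eq_true, if_false]
      exact ih

lemma pvIndexInit_eq :
    pvIndexInit = (PySem.Dict.mk (pvTbl.map (fun p => (p.1, Int.ofNat p.2))), some 6) := by
  rfl

-- B-side characterization
lemma stageBidx_eq (nl : String) : stageBidx nl = (pvCls nl).map Int.ofNat := by
  unfold stageBidx pvCls
  rw [pvIndexInit_eq, dict_get?_mk_map]
  cases h : pvTbl.lookup nl <;> simp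

lemma stageBstep_eq (acc : Option Nat) (name : String) :
    stageBstep (acc.map Int.ofNat) name
      = (pvMin acc (pvCls (PySem.Str.lower name))).map Int.ofNat := by
  unfold stageBstep
  rw [stageBidx_eq]
  cases h : pvCls (PySem.Str.lower name) <;> cases acc <;> simp [pvMin]
  next i b =>
    rcases Nat.lt_or_ge i b with hib | hib
    · rw [if_pos hib, min_eq_right (by exact_mod_cast le_of_lt hib)]
    · rw [if_neg (Nat.not_lt.2 hib), min_eq_left (by exact_mod_cast hib)]

lemma foldB_eq (tn : List String) (acc : Option Nat) :
    tn.foldl stageBstep (acc.map Int.ofNat) =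
      ((tn.map PySem.Str.lower).foldl (fun a n => pvMin a (pvCls n)) acc).map Int.ofNat := by
  induction tn generalizing acc with
  | nil => rfl
  | cons n t ih =>
    rw [List.foldl_cons, stageBstep_eq, ih, List.map_cons, List.foldl_cons]

-- option-min fold is min? of the filterMap
lemma fold_min? (M : List String) (acc : Option Nat) :
    M.foldl (fun a n => pvMin a (pvCls n)) acc = (acc.toList ++ M.filterMap pvCls).min? := by
  induction M generalizing acc with
  | nil => cases acc <;> rfl
  | cons n t ih =>
    rw [List.foldl_cons, ih, List.filterMap_cons]
    cases hacc : acc <;> cases hcls : pvCls n <;> simp [pvMin]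
    cases (List.filterMap pvCls t).min? <;> simp [min_assoc]

lemma B_char (tn : List String) :
    stage_b_py_alt tn = pvOut (((tn.map PySem.Str.lower).filterMap pvCls).min?) := by
  unfold stage_b_py_alt
  have h1 : tn.foldl stageBstep none
      = (((tn.map PySem.Str.lower).filterMap pvCls).min?).map Int.ofNat := by
    have h2 := foldB_eq tn none
    rw [fold_min?] at h2
    simpa using h2
  rw [h1]
  cases h : ((tn.map PySem.Str.lower).filterMap pvCls).min? with
  | none => rfl
  | some k =>
    have hk : k ≤ 6 := by
      obtain ⟨hmem, -⟩ := List.min?_eq_some_iff.1 h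
      obtain ⟨n, -, hn⟩ := List.mem_filterMap.1 hmem
      exact pvCls_le n k hn
    interval_cases k <;> rfl

-- A-side: helper facts about the marker table
lemma lookup_mem (l : List (String × Nat)) (n : String) (v : Nat)
    (h : l.lookup n = some v) : (n, v) ∈ l := by
  induction l with
  | nil => simp [List.lookup] at h
  | cons p t ih =>
    rcases p with ⟨a, b⟩
    rw [List.lookup_cons] at h
    split at h
    · next hb => injection h with h; simp [eq_of_beq hb, ← h]
    · simp [ih h]

lemma pvCls_some_iff (n : String) (i : Nat) (hi : i ≤ 5) :
    pvCls n = some i ↔ pvTbl.lookup n = some i := by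
  unfold pvCls
  cases h : pvTbl.lookup n
  · constructor
    · intro hc
      by_cases hend : PySem.Str.endswith n ".ato" = true
      · rw [if_pos hend] at hc; injection hc with hc; omega
      · rw [if_neg hend] at hc; exact absurd hc (by simp)
    · intro hc; exact absurd hc (by simp)
  · exact Iff.rfl

lemma cls6_iff (n : String) : pvCls n = some 6 ↔ PySem.Str.endswith n ".ato" = true := by
  unfold pvCls
  cases h : pvTbl.lookup n
  · split <;> simp_all
  · next j =>
    constructor
    · intro h6; injection h6 with h6; exact absurd (lookup_le n j h) (by omega)
    · intro hend
      exfalso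
      have hmem := lookup_mem _ _ _ h
      simp [pvTbl] at hmem
      rcases hmem with ⟨rfl, -⟩ | ⟨rfl, -⟩ | ⟨rfl, -⟩ | ⟨rfl, -⟩ | ⟨rfl, -⟩ | ⟨rfl, -⟩ | ⟨rfl, -⟩ | ⟨rfl, -⟩ | ⟨rfl, -⟩ | ⟨rfl, -⟩ | ⟨rfl, -⟩ <;>
        exact absurd hend (by decide)

lemma hit_iff (M : List String) (i : Nat) (hi : i ≤ 5) :
    i ∈ M.filterMap pvCls ↔ ∃ n ∈ M, pvTbl.lookup n = some i := by
  rw [List.mem_filterMap]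
  exact exists_congr fun n => and_congr_right fun _ => pvCls_some_iff n i hi

-- A-side: the scan over the literal rule list unfolds to an if-chain over marker memberships
lemma A_unfold (M : List String) :
    stageAscan M pvRules =
      (if "xmake.lua" ∈ M then pvOut (some 0)
       else if "cmakelists.txt" ∈ M then pvOut (some 1)
       else if "package.json" ∈ M ∨ "pnpm-lock.yaml" ∈ M ∨ "bun.lockb" ∈ M then pvOut (some 2)
       else if "pyproject.toml" ∈ M ∨ "uv.lock" ∈ M ∨ "requirements.txt" ∈ M ∨ "pipfile" ∈ M then pvOut (some 3)
       else if "cargo.toml" ∈ M then pvOut (some 4)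
       else if "go.mod" ∈ M then pvOut (some 5)
       else if M.any (fun n => PySem.Str.endswith n ".ato") then pvOut (some 6)
       else pvOut none) := by
  have l1 : PySem.Str.lower "xmake.lua" = "xmake.lua" := by decide
  have l2 : PySem.Str.lower "CMakeLists.txt" = "cmakelists.txt" := by decide
  have l3 : PySem.Str.lower "package.json" = "package.json" := by decide
  have l4 : PySem.Str.lower "pnpm-lock.yaml" = "pnpm-lock.yaml" := by decide
  have l5 : PySem.Str.lower "bun.lockb" = "bun.lockb" := by decide
  have l6 : PySem.Str.lower "pyproject.toml" = "pyproject.toml" := by decide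
  have l7 : PySem.Str.lower "uv.lock" = "uv.lock" := by decide
  have l8 : PySem.Str.lower "requirements.txt" = "requirements.txt" := by decide
  have l9 : PySem.Str.lower "Pipfile" = "pipfile" := by decide
  have l10 : PySem.Str.lower "Cargo.toml" = "cargo.toml" := by decide
  have l11 : PySem.Str.lower "go.mod" = "go.mod" := by decide
  have l12 : PySem.Str.lower ".ato" = ".ato" := by decide
  have s1 : ∀ m : String, PySem.Str.startswith m "." = false →
      stageAmarker M m = M.contains m := by
    intro m hm; unfold stageAmarker; rw [hm]; simp
  have s2 : stageAmarker M ".ato" = M.any (fun n => PySem.Str.endswith n ".ato") := by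
    unfold stageAmarker; rw [if_pos (by decide)]
  have a1 : stageAmarker M "xmake.lua" = M.contains "xmake.lua" := s1 "xmake.lua" (by decide)
  have a2 : stageAmarker M "cmakelists.txt" = M.contains "cmakelists.txt" := s1 "cmakelists.txt" (by decide)
  have a3 : stageAmarker M "package.json" = M.contains "package.json" := s1 "package.json" (by decide)
  have a4 : stageAmarker M "pnpm-lock.yaml" = M.contains "pnpm-lock.yaml" := s1 "pnpm-lock.yaml" (by decide)
  have a5 : stageAmarker M "bun.lockb" = M.contains "bun.lockb" := s1 "bun.lockb" (by decide)
  have a6 : stageAmarker M "pyproject.toml" = M.contains "pyproject.toml" := s1 "pyproject.toml" (by decide)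
  have a7 : stageAmarker M "uv.lock" = M.contains "uv.lock" := s1 "uv.lock" (by decide)
  have a8 : stageAmarker M "requirements.txt" = M.contains "requirements.txt" := s1 "requirements.txt" (by decide)
  have a9 : stageAmarker M "pipfile" = M.contains "pipfile" := s1 "pipfile" (by decide)
  have a10 : stageAmarker M "cargo.toml" = M.contains "cargo.toml" := s1 "cargo.toml" (by decide)
  have a11 : stageAmarker M "go.mod" = M.contains "go.mod" := s1 "go.mod" (by decide)
  simp only [stageAscan, pvRules, List.any_cons, List.any_nil,
    l1, l2, l3, l4, l5, l6, l7, l8, l9, l10, l11, l12, s2,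
    a1, a2, a3, a4, a5, a6, a7, a8, a9, a10, a11]
  simp [pvOut]

lemma A_char (tn : List String) :
    stage_b_py tn = pvOut (((tn.map PySem.Str.lower).filterMap pvCls).min?) := by
  unfold stage_b_py
  rw [A_unfold]
  set M := tn.map PySem.Str.lower with hM
  set L := M.filterMap pvCls with hL
  have e0 : ("xmake.lua" ∈ M) ↔ 0 ∈ L := by
    rw [hL, hit_iff M 0 (by omega)]
    constructor
    · intro h; exact ⟨_, h, by decide⟩
    · rintro ⟨n, hn, hl⟩
      have hm := lookup_mem _ _ _ hl
      simp [pvTbl] at hm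
      subst hm; exact hn
  have e1 : ("cmakelists.txt" ∈ M) ↔ 1 ∈ L := by
    rw [hL, hit_iff M 1 (by omega)]
    constructor
    · intro h; exact ⟨_, h, by decide⟩
    · rintro ⟨n, hn, hl⟩
      have hm := lookup_mem _ _ _ hl
      simp [pvTbl] at hm
      subst hm; exact hn
  have e2 : ("package.json" ∈ M ∨ "pnpm-lock.yaml" ∈ M ∨ "bun.lockb" ∈ M) ↔ 2 ∈ L := by
    rw [hL, hit_iff M 2 (by omega)]
    constructor
    · intro h
      rcases h with h|h|h <;> exact ⟨_, h, by decide⟩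
    · rintro ⟨n, hn, hl⟩
      have hm := lookup_mem _ _ _ hl
      simp [pvTbl] at hm
      rcases hm with rfl|rfl|rfl
      · exact Or.inl hn
      · exact Or.inr (Or.inl hn)
      · exact Or.inr (Or.inr hn)
  have e3 : ("pyproject.toml" ∈ M ∨ "uv.lock" ∈ M ∨ "requirements.txt" ∈ M ∨ "pipfile" ∈ M) ↔ 3 ∈ L := by
    rw [hL, hit_iff M 3 (by omega)]
    constructor
    · intro h
      rcases h with h|h|h|h <;> exact ⟨_, h, by decide⟩
    · rintro ⟨n, hn, hl⟩
      have hm := lookup_mem _ _ _ hl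
      simp [pvTbl] at hm
      rcases hm with rfl|rfl|rfl|rfl
      · exact Or.inl hn
      · exact Or.inr (Or.inl hn)
      · exact Or.inr (Or.inr (Or.inl hn))
      · exact Or.inr (Or.inr (Or.inr hn))
  have e4 : ("cargo.toml" ∈ M) ↔ 4 ∈ L := by
    rw [hL, hit_iff M 4 (by omega)]
    constructor
    · intro h; exact ⟨_, h, by decide⟩
    · rintro ⟨n, hn, hl⟩
      have hm := lookup_mem _ _ _ hl
      simp [pvTbl] at hm
      subst hm; exact hn
  have e5 : ("go.mod" ∈ M) ↔ 5 ∈ L := by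
    rw [hL, hit_iff M 5 (by omega)]
    constructor
    · intro h; exact ⟨_, h, by decide⟩
    · rintro ⟨n, hn, hl⟩
      have hm := lookup_mem _ _ _ hl
      simp [pvTbl] at hm
      subst hm; exact hn
  have e6 : ((M.any fun n => PySem.Str.endswith n ".ato") = true) ↔ 6 ∈ L := by
    rw [hL, List.mem_filterMap, List.any_eq_true]
    exact exists_congr fun n => and_congr_right fun _ => (cls6_iff n).symm
  cases h : L.min? with
  | none =>
    have hnomem : ∀ j : Nat, j ∉ L := by simp [List.min?_eq_none_iff.1 h]
    rw [if_neg (fun hc => hnomem _ (e0.1 hc))]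
    rw [if_neg (fun hc => hnomem _ (e1.1 hc))]
    rw [if_neg (fun hc => hnomem _ (e2.1 hc))]
    rw [if_neg (fun hc => hnomem _ (e3.1 hc))]
    rw [if_neg (fun hc => hnomem _ (e4.1 hc))]
    rw [if_neg (fun hc => hnomem _ (e5.1 hc))]
    rw [if_neg (fun hc => hnomem _ (e6.1 hc))]
  | some k =>
    obtain ⟨hmem, hmin⟩ := List.min?_eq_some_iff.1 h
    have hk : k ≤ 6 := by
      rw [hL] at hmem
      obtain ⟨n, -, hn⟩ := List.mem_filterMap.1 hmem
      exact pvCls_le n k hn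
    have hnot : ∀ j, j < k → j ∉ L := fun j hj hjm => absurd (hmin j hjm) (by omega)
    interval_cases k
    · -- k = 0
      rw [if_pos (e0.2 hmem)]
    · -- k = 1
      rw [if_neg (fun hc => hnot 0 (by omega) (e0.1 hc))]
      rw [if_pos (e1.2 hmem)]
    · -- k = 2
      rw [if_neg (fun hc => hnot 0 (by omega) (e0.1 hc))]
      rw [if_neg (fun hc => hnot 1 (by omega) (e1.1 hc))]
      rw [if_pos (e2.2 hmem)]
    · -- k = 3
      rw [if_neg (fun hc => hnot 0 (by omega) (e0.1 hc))]
      rw [if_neg (fun hc => hnot 1 (by omega) (e1.1 hc))]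
      rw [if_neg (fun hc => hnot 2 (by omega) (e2.1 hc))]
      rw [if_pos (e3.2 hmem)]
    · -- k = 4
      rw [if_neg (fun hc => hnot 0 (by omega) (e0.1 hc))]
      rw [if_neg (fun hc => hnot 1 (by omega) (e1.1 hc))]
      rw [if_neg (fun hc => hnot 2 (by omega) (e2.1 hc))]
      rw [if_neg (fun hc => hnot 3 (by omega) (e3.1 hc))]
      rw [if_pos (e4.2 hmem)]
    · -- k = 5
      rw [if_neg (fun hc => hnot 0 (by omega) (e0.1 hc))]
      rw [if_neg (fun hc => hnot 1 (by omega) (e1.1 hc))]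
      rw [if_neg (fun hc => hnot 2 (by omega) (e2.1 hc))]
      rw [if_neg (fun hc => hnot 3 (by omega) (e3.1 hc))]
      rw [if_neg (fun hc => hnot 4 (by omega) (e4.1 hc))]
      rw [if_pos (e5.2 hmem)]
    · -- k = 6
      rw [if_neg (fun hc => hnot 0 (by omega) (e0.1 hc))]
      rw [if_neg (fun hc => hnot 1 (by omega) (e1.1 hc))]
      rw [if_neg (fun hc => hnot 2 (by omega) (e2.1 hc))]
      rw [if_neg (fun hc => hnot 3 (by omega) (e3.1 hc))]
      rw [if_neg (fun hc => hnot 4 (by omega) (e4.1 hc))]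
      rw [if_neg (fun hc => hnot 5 (by omega) (e5.1 hc))]
      rw [if_pos (e6.2 hmem)]

-- ===== VERDICT (by name: the statement is the Claim_ definition above) =====
theorem stage_b_py_spec : Claim_equal_stage_b_py := by
  intro tn _
  unfold Spec_stage_b_py
  rw [A_char, B_char]
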